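-- pv_equiv track=rewrite | github.com/SavageDud/Crypto_coin_demo | Django_web_app/crypto_demo/crypto_demo/Crypto_utulity_v2.py | Break_down_hash
-- ===== SOURCE A (Python) =====
-- def Break_down_hash(hash_str):
--     MAX_LEN = 2
--     segments = []
--     c = ""
--
--     for char_ in range(0 , len(hash_str)):
--         c = c + hash_str[char_]
--         if (char_ % MAX_LEN == 0):
--             segments.append(c)
--             c = ""
--     if(len(c) > 0) :
--         segments.append(c)
--     return segments
-- ===== SOURCE B (Python) =====
-- def Break_down_hash(hash_str):
--     if not hash_str:
--         return []
--     segments = [hash_str[0]]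
--     rest = hash_str[1:]
--     while rest:
--         segments.append(rest[:2])
--         rest = rest[2:]
--     return segments
-- ===== Notes on version B (the rewrite author's own statement) =====
-- stated objective: simpler
-- what changed: Replaces the per-character loop with a parity-flushed accumulator by a direct chunk decomposition: emit the first character, then repeatedly slice two-character chunks off the remainder.
import Mathlib
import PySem

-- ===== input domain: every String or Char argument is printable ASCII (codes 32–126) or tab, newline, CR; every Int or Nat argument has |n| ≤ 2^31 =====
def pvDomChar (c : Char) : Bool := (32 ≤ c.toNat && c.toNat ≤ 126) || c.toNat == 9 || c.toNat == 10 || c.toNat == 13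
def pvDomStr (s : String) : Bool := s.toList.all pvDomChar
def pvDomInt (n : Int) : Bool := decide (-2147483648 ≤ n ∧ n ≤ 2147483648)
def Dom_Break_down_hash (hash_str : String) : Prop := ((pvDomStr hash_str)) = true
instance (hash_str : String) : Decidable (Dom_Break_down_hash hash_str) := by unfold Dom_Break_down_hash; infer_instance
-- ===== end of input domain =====

-- B replaces A's per-character loop with parity flushes by a direct chunk decomposition
-- (first character, then two-character slices off the remainder): a simpler decomposition.

-- ===== PORT A =====
-- for char_ in range(0, len(hash_str)): c = c + hash_str[char_]; if char_ % 2 == 0: flush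
def Break_down_hash (hash_str : String) : List String :=
  let cs := hash_str.toList
  let st :=
    (PySem.List.pyRange 0 (PySem.List.len cs) 1).foldl
      (fun (acc : List (List Char) × List Char) char_ =>
        let c := acc.2 ++ [PySem.List.pyGetD cs char_ ' ']
        if PySem.Int.mod char_ 2 = 0 then (acc.1 ++ [c], []) else (acc.1, c))
      ([], [])
  (if st.2.length > 0 then st.1 ++ [st.2] else st.1).map String.ofList

-- ===== PORT B =====
-- the while loop of Source B: append rest[:2] and continue with rest[2:]
def pvChunksB (rest : List Char) : List String :=
  match rest with
  | [] => []
  | c :: tl =>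
      String.ofList (PySem.List.slice (c :: tl) none (some 2)) ::
        pvChunksB (PySem.List.slice (c :: tl) (some 2) none)
termination_by rest.length
decreasing_by
  simp [pysem]

def Break_down_hash_alt (hash_str : String) : List String :=
  match hash_str.toList with
  | [] => []
  | x :: rest => String.ofList [x] :: pvChunksB rest

-- ===== PRECONDITION & SPEC =====
def Spec_Break_down_hash (hash_str : String) (out : List String) : Prop := out = Break_down_hash_alt hash_str
instance (hash_str : String) (out : List String) : Decidable (Spec_Break_down_hash hash_str out) := by unfold Spec_Break_down_hash; infer_instance

-- ===== CLAIM (what is proved, stated in full; the proofs are below) =====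
def Claim_equal_Break_down_hash : Prop := ∀ (hash_str : String), Dom_Break_down_hash hash_str → Spec_Break_down_hash hash_str (Break_down_hash hash_str)

-- ===== LEMMAS AND PROOFS =====

-- pvChunksB's slices, spelled as take/drop
theorem pvChunksB_cons (x : Char) (xs : List Char) :
    pvChunksB (x :: xs) = String.ofList ((x :: xs).take 2) :: pvChunksB ((x :: xs).drop 2) := by
  rw [pvChunksB.eq_def]
  simp [pysem]

theorem pvChunksB_nil : pvChunksB [] = [] := by
  rw [pvChunksB.eq_def]

-- structural version of A's loop (chars still to process, current index, segments, pending chunk)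
def pvLoopA : List Char → Nat → List (List Char) → List Char → List (List Char) × List Char
  | [], _, segs, c => (segs, c)
  | x :: xs, i, segs, c =>
      let c' := c ++ [x]
      if i % 2 = 0 then pvLoopA xs (i + 1) (segs ++ [c']) [] else pvLoopA xs (i + 1) segs c'

-- A's foldl over the range of indices is the structural loop
theorem pvFoldEqLoop (suf : List Char) : ∀ (pre : List Char) (segs : List (List Char)) (c : List Char),
    (PySem.List.pyRange (pre.length : Int) ((pre.length : Int) + (suf.length : Int)) 1).foldl
      (fun (acc : List (List Char) × List Char) char_ =>
        let cnew := acc.2 ++ [PySem.List.pyGetD (pre ++ suf) char_ ' ']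
        if PySem.Int.mod char_ 2 = 0 then (acc.1 ++ [cnew], []) else (acc.1, cnew))
      (segs, c)
      = pvLoopA suf pre.length segs c := by
  induction suf with
  | nil =>
      intro pre segs c
      rw [PySem.List.pyRange_one_eq_nil (by simp)]
      simp [pvLoopA]
  | cons x xs ih =>
      intro pre segs c
      rw [PySem.List.pyRange_one_cons (by simp)]
      have hget : PySem.List.pyGetD (pre ++ x :: xs) (pre.length : Int) ' ' = x := by
        simp [PySem.List.pyGetD_natCast, List.getD_eq_getElem?_getD]
      have hmod : PySem.Int.mod (pre.length : Int) 2 = ((pre.length % 2 : Nat) : Int) := by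
        exact_mod_cast PySem.Int.mod_natCast pre.length 2
      have hpre := ih (pre ++ [x])
      simp only [List.append_assoc, List.singleton_append, List.length_append,
        List.length_singleton] at hpre
      push_cast at hpre
      simp only [List.foldl_cons, hget, hmod]
      by_cases hp : pre.length % 2 = 0
      · rw [if_pos (by omega)]
        rw [pvLoopA]
        simp only [hp, reduceIte]
        have := hpre (segs ++ [c ++ [x]]) []
        convert this using 3; push_cast [List.length_cons]; ring
      · rw [if_neg (by omega)]
        rw [pvLoopA]
        simp only [if_neg hp]
        have := hpre segs (c ++ [x])
        convert this using 3; push_cast [List.length_cons]; ring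

-- at an odd index with empty pending chunk, A's loop (plus the final flush) produces B's chunks
theorem pvLoopOdd (xs : List Char) : ∀ (i : Nat) (segs : List (List Char)), i % 2 = 1 →
    (let st := pvLoopA xs i segs []
     (if st.2.length > 0 then st.1 ++ [st.2] else st.1).map String.ofList)
      = segs.map String.ofList ++ pvChunksB xs :=
  match xs with
  | [] => by
      intro i segs hi
      simp [pvLoopA, pvChunksB_nil]
  | [x] => by
      intro i segs hi
      simp only [pvLoopA, List.nil_append, if_neg (by omega : ¬ i % 2 = 0)]
      simp [pvChunksB_cons, pvChunksB_nil]
  | x :: y :: rest => by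
      intro i segs hi
      simp only [pvLoopA, List.nil_append, List.append_assoc, List.singleton_append,
        if_neg (by omega : ¬ i % 2 = 0), if_pos (by omega : (i + 1) % 2 = 0)]
      have hrec := pvLoopOdd rest (i + 1 + 1) (segs ++ [[x, y]]) (by omega)
      simp only [hrec, pvChunksB_cons]
      simp

-- ===== VERDICT (by name: the statement is the Claim_ definition above) =====
theorem Break_down_hash_spec : Claim_equal_Break_down_hash := by
  intro hash_str _
  unfold Spec_Break_down_hash Break_down_hash Break_down_hash_alt
  cases hcs : hash_str.toList with
  | nil =>
      simp only [PySem.List.len_eq, List.length_nil, Nat.cast_zero,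
        PySem.List.pyRange_one_eq_nil (le_refl 0)]
      simp
  | cons x rest =>
      have hfold := pvFoldEqLoop (x :: rest) [] [] []
      simp only [List.length_nil, List.nil_append, Nat.cast_zero, zero_add] at hfold
      simp only [PySem.List.len_eq, hfold]
      rw [pvLoopA]
      simp only [List.nil_append, Nat.zero_mod, reduceIte]
      have := pvLoopOdd rest 1 [[x]] rfl
      simpa using this
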